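-- pv_equiv track=rewrite | github.com/Panda-Z-Coding/PythonAlgorithm | 5128.py | look_for
-- ===== SOURCE A (Python) =====
-- def look_for(p_) -> int:
--     #p_是一个字符串
--     dir = 0 # 下标
--     for p in p_:
--         if p == 'L':
--             dir = 2*dir + 1
--         if p == 'R':
--             dir = 2*dir + 2
--     return dir
-- ===== SOURCE B (Python) =====
-- def look_for(p_) -> int:
--     bits = [c for c in p_ if c in 'LR']
--     n = len(bits)
--     b = int(''.join('0' if c == 'L' else '1' for c in bits), 2) if bits else 0
--     return (1 << n) - 1 + b
-- ===== Notes on version B (the rewrite author's own statement) =====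
-- stated objective: alternative
-- what changed: Replaces the per-character Horner accumulation over the whole string with a filter to the meaningful L/R characters followed by the closed form 2**n - 1 + int(bits, 2) of the tree-index recurrence.
import Mathlib
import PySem

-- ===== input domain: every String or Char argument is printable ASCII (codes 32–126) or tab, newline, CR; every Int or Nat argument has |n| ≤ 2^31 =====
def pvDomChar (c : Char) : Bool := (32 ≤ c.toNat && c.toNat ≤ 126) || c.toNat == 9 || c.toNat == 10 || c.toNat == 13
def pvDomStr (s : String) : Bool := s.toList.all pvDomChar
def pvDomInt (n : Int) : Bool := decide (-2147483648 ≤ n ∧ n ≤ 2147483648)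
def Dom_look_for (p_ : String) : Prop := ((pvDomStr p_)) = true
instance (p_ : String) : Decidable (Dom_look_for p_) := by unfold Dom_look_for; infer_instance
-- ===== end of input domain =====

-- ===== PORT A =====
def look_for (p_ : String) : Int :=
  p_.toList.foldl (fun dir p =>
    let dir := if p = 'L' then 2 * dir + 1 else dir
    if p = 'R' then 2 * dir + 2 else dir) 0

-- ===== PORT B =====
-- int(s, 2) on a string of '0'/'1' characters is ported as the standard binary-value fold
def binVal (bits : List Char) : Int :=
  bits.foldl (fun a c => 2 * a + (if c = 'R' then 1 else 0)) 0

def look_for_alt (p_ : String) : Int :=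
  let bits := p_.toList.filter (fun c => c = 'L' ∨ c = 'R')
  let n := bits.length
  let b := binVal bits
  2 ^ n - 1 + b

-- ===== PRECONDITION & SPEC =====
def Spec_look_for (p_ : String) (out : Int) : Prop := out = look_for_alt p_
instance (p_ : String) (out : Int) : Decidable (Spec_look_for p_ out) := by unfold Spec_look_for; infer_instance

-- ===== CLAIM (what is proved, stated in full; the proofs are below) =====
def Claim_equal_look_for : Prop := ∀ (p_ : String), Dom_look_for p_ → Spec_look_for p_ (look_for p_)

-- ===== LEMMAS AND PROOFS =====

-- ===== VERDICT (by name: the statement is the Claim_ definition above) =====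
-- A's fold skips non-L/R characters: it equals a fold over the filtered list
theorem foldA_filter (l : List Char) (d : Int) :
    l.foldl (fun dir p =>
      let dir := if p = 'L' then 2 * dir + 1 else dir
      if p = 'R' then 2 * dir + 2 else dir) d
    = (l.filter (fun c => c = 'L' ∨ c = 'R')).foldl
        (fun a c => 2 * a + (if c = 'R' then 2 else 1)) d := by
  induction l generalizing d with
  | nil => rfl
  | cons c l ih =>
    by_cases hL : c = 'L' <;> by_cases hR : c = 'R' <;>
      simp_all [List.foldl, List.filter]

-- shifting the accumulator of the bit fold
theorem binFold_shift (l : List Char) (x t : Int) :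
    l.foldl (fun a c => 2 * a + (if c = 'R' then 1 else 0)) (x + t)
    = l.foldl (fun a c => 2 * a + (if c = 'R' then 1 else 0)) x + t * 2 ^ l.length := by
  induction l generalizing x t with
  | nil => simp
  | cons c l ih =>
    simp only [List.foldl, List.length_cons]
    have : 2 * (x + t) + (if c = 'R' then 1 else 0)
        = (2 * x + (if c = 'R' then 1 else 0)) + 2 * t := by ring
    rw [this, ih]
    ring

-- A's step on an L/R character equals B's bit step plus a doubling "+1"
theorem foldG_eq (l : List Char) (a : Int) :
    l.foldl (fun a c => 2 * a + (if c = 'R' then 2 else 1)) a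
    = 2 ^ l.length - 1 + l.foldl (fun a c => 2 * a + (if c = 'R' then 1 else 0)) a := by
  induction l generalizing a with
  | nil => simp
  | cons c l ih =>
    simp only [List.foldl, List.length_cons]
    have h1 : 2 * a + (if c = 'R' then 2 else 1)
        = (2 * a + (if c = 'R' then 1 else 0)) + 1 := by
      by_cases hc : c = 'R' <;> simp [hc] <;> ring
    rw [h1, ih, binFold_shift]
    ring

-- ===== VERDICT (by name: the statement is the Claim_ definition above) =====
theorem look_for_spec : Claim_equal_look_for := by
  intro p_ _
  unfold Spec_look_for look_for look_for_alt binVal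
  rw [foldA_filter, foldG_eq]
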